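-- pv_equiv track=rewrite | github.com/YaroslavAnanich/AOIS | lab2/main.py | create_truth_table
-- ===== SOURCE A (Python) =====
-- import itertools
--
-- def evaluate_expression(expression, variables):
--     stack = []
--     for token in expression:
--         if token in variables:
--             stack.append(variables[token])
--         elif token == '!':
--             stack[-1] = not stack[-1]
--         elif token == '&':
--             b = stack.pop()
--             a = stack.pop()
--             stack.append(a and b)
--         elif token == '|':
--             b = stack.pop()
--             a = stack.pop()
--             stack.append(a or b)
--         elif token == '-':
--             b = stack.pop()
--             a = stack.pop()
--             stack.append(not a or b)
--         elif token == '~':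
--             b = stack.pop()
--             a = stack.pop()
--             stack.append((not a or b) and (not b or a))
--     return stack[0]
--
-- def create_truth_table(expression):
--     int_result = ""
--     variables = sorted(set(token for token in expression if token.isalpha()))
--     n_variables = len(variables)
--
--     combinations = list(itertools.product([False, True], repeat=n_variables))
--
--     truth_table = []
--     for combination in combinations:
--         variable_values = {var: value for var, value in zip(variables, combination)}
--
--         result = evaluate_expression(expression, variable_values)
--
--         truth_table.append(combination + (result,))
--         int_result += str(int(result))
--     return truth_table, variables, int_result
-- ===== SOURCE B (Python) =====
-- import itertools
--
-- def _parse(expression):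
--     # One pass: build an expression tree from the postfix token list.
--     stack = []
--     for token in expression:
--         if token.isalpha():
--             stack.append(('v', token))
--         elif token == '!':
--             stack[-1] = ('!', stack[-1])
--         elif token in ('&', '|', '-', '~'):
--             b = stack.pop()
--             a = stack.pop()
--             stack.append((token, a, b))
--     return stack[0]
--
-- def _eval(tree, values):
--     tag = tree[0]
--     if tag == 'v':
--         return values[tree[1]]
--     if tag == '!':
--         return not _eval(tree[1], values)
--     a = _eval(tree[1], values)
--     b = _eval(tree[2], values)
--     if tag == '&':
--         return a and b
--     if tag == '|':
--         return a or b
--     if tag == '-':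
--         return (not a) or b
--     return ((not a) or b) and ((not b) or a)
--
-- def create_truth_table(expression):
--     variables = sorted(set(t for t in expression if t.isalpha()))
--     tree = _parse(expression)
--     rows = [(c, _eval(tree, dict(zip(variables, c))))
--             for c in itertools.product([False, True], repeat=len(variables))]
--     truth_table = [c + (r,) for c, r in rows]
--     int_result = ''.join('1' if r else '0' for _, r in rows)
--     return truth_table, variables, int_result
-- ===== Notes on version B (the rewrite author's own statement) =====
-- stated objective: alternative
-- what changed: B parses the postfix token list once into an expression tree and evaluates that tree recursively per row, instead of A's re-running a stack machine over the whole token list (with a dict membership test per token) for every one of the 2^n rows.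
import Mathlib
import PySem

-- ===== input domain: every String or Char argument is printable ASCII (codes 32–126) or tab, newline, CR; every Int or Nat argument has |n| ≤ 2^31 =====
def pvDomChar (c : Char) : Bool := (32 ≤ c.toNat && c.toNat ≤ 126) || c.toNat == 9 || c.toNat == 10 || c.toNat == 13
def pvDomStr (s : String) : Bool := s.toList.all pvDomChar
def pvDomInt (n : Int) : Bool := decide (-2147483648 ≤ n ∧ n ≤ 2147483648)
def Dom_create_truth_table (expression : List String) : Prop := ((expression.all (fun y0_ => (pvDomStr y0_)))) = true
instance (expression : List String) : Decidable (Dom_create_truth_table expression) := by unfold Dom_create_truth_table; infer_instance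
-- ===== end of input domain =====

-- B replaces A's per-row stack-machine re-scan of the token list by a single parse into an
-- expression tree evaluated recursively per row (alternative decomposition, same results).

-- ===== PORT A =====

-- shared by both Pythons: variables = sorted(set(t for t in expression if t.isalpha()))
def varsOf (expression : List String) : List String :=
  PySem.List.sorted (PySem.Set.ofList (expression.filter (fun t => PySem.Str.strIsalpha t))) (fun x => x) false

-- itertools.product([False, True], repeat=n), in Python's order (leftmost varies slowest)
def pyProductBools : Nat → List (List Bool)
  | 0 => [[]]
  | n+1 => (pyProductBools n).map (false :: ·) ++ (pyProductBools n).map (true :: ·)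

-- one token of A's evaluate_expression loop; stack head = Python's stack top; none = IndexError
def evalStep (vs : PySem.Dict String Bool) (stack : Option (List Bool)) (token : String) :
    Option (List Bool) :=
  match stack with
  | none => none
  | some st =>
    if vs.contains token then
      some (vs.getD token false :: st)   -- variables[token]; the guard makes KeyError impossible
    else if token = "!" then
      match st with
      | t :: rest => some ((!t) :: rest)        -- stack[-1] = not stack[-1]; empty stack = IndexError
      | [] => none
    else if token = "&" then
      match st with
      | b :: a :: rest => some ((a && b) :: rest)
      | _ => none
    else if token = "|" then
      match st with
      | b :: a :: rest => some ((a || b) :: rest)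
      | _ => none
    else if token = "-" then
      match st with
      | b :: a :: rest => some (((!a) || b) :: rest)
      | _ => none
    else if token = "~" then
      match st with
      | b :: a :: rest => some ((((!a) || b) && ((!b) || a)) :: rest)
      | _ => none
    else some st

-- return stack[0]: the BOTTOM of the stack (getLast? in the head-is-top representation)
def evaluate_expression (expression : List String) (vs : PySem.Dict String Bool) :
    Option Bool :=
  (expression.foldl (evalStep vs) (some [])).bind List.getLast?

def create_truth_table (expression : List String) : List (List Bool) × List String × String :=
  let vs := varsOf expression
  let combinations := pyProductBools vs.length
  let acc := combinations.foldl (fun (acc : List (List Bool) × String) combination =>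
      let variable_values := PySem.Dict.ofList (vs.zip combination)
      -- none = IndexError inside evaluate_expression, excluded by Pre_
      let result := (evaluate_expression expression variable_values).getD false
      (acc.1 ++ [combination ++ [result]], acc.2 ++ PySem.Int.toStr (if result then 1 else 0)))
    ([], "")
  (acc.1, vs, acc.2)

-- ===== PORT B =====

-- B's expression tree (tuples ('v',x) / ('!',t) / (op,a,b) in Source B)
inductive BExpr where
  | var : String → BExpr
  | neg : BExpr → BExpr
  | node : String → BExpr → BExpr → BExpr
deriving DecidableEq, Repr

-- one token of Source B's _parse loop; none = IndexError
def parseStep (stack : Option (List BExpr)) (token : String) : Option (List BExpr) :=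
  match stack with
  | none => none
  | some st =>
    if PySem.Str.strIsalpha token then some (.var token :: st)
    else if token = "!" then
      match st with
      | t :: rest => some (.neg t :: rest)
      | [] => none
    else if token = "&" ∨ token = "|" ∨ token = "-" ∨ token = "~" then
      match st with
      | b :: a :: rest => some (.node token a b :: rest)
      | _ => none
    else some st

-- _parse: returns stack[0] (bottom)
def parseTree (expression : List String) : Option BExpr :=
  (expression.foldl parseStep (some [])).bind List.getLast?

-- Source B's _eval; values[x] cannot raise KeyError under Pre_: every leaf is an alpha token of expression
def evalTree (values : PySem.Dict String Bool) : BExpr → Bool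
  | .var s => values.getD s false
  | .neg t => !(evalTree values t)
  | .node op a b =>
    let va := evalTree values a
    let vb := evalTree values b
    if op = "&" then va && vb
    else if op = "|" then va || vb
    else if op = "-" then (!va) || vb
    else ((!va) || vb) && ((!vb) || va)

def create_truth_table_alt (expression : List String) : List (List Bool) × List String × String :=
  let vs := varsOf expression
  let tree := (parseTree expression).getD (.var "")   -- none = IndexError in _parse, excluded by Pre_
  let rows := (pyProductBools vs.length).map
      (fun c => (c, evalTree (PySem.Dict.ofList (vs.zip c)) tree))
  (rows.map (fun r => r.1 ++ [r.2]), vs,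
   PySem.Str.join "" (rows.map (fun r => if r.2 then "1" else "0")))

-- ===== PRECONDITION & SPEC =====

-- stack depth after each token (none = underflow); mirrors only the SHAPE of the postfix expression
def depthStep (d : Option Nat) (token : String) : Option Nat :=
  match d with
  | none => none
  | some k =>
    if PySem.Str.strIsalpha token then some (k+1)
    else if token = "!" then (if 1 ≤ k then some k else none)
    else if token = "&" ∨ token = "|" ∨ token = "-" ∨ token = "~" then
      (if 2 ≤ k then some (k-1) else none)
    else some k

-- Pre_ is postfix well-formedness (stack balance): every '!' and every binary operator finds its
-- operand(s) and the final stack is nonempty — exactly the inputs on which A's evaluate_expression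
-- (and Source B's _parse) does not raise IndexError.
def Pre_create_truth_table (expression : List String) : Prop :=
  1 ≤ (expression.foldl depthStep (some 0)).getD 0

instance (expression : List String) : Decidable (Pre_create_truth_table expression) := by
  unfold Pre_create_truth_table; infer_instance

def pvWitness_create_truth_table : List String := ["A", "B", "&", "!"]

def Spec_create_truth_table (expression : List String)
    (out : List (List Bool) × List String × String) : Prop :=
  out = create_truth_table_alt expression

instance (expression : List String) (out : List (List Bool) × List String × String) :
    Decidable (Spec_create_truth_table expression out) := by
  unfold Spec_create_truth_table; infer_instance

-- ===== CLAIM (what is proved, stated in full; the proofs are below) =====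
def Claim_equal_create_truth_table : Prop :=
  ∀ (expression : List String), Dom_create_truth_table expression →
    Pre_create_truth_table expression →
    Spec_create_truth_table expression (create_truth_table expression)

-- ===== LEMMAS AND PROOFS =====

lemma foldl_evalStep_none (v : PySem.Dict String Bool) (l : List String) :
    l.foldl (evalStep v) none = none := by
  induction l with
  | nil => rfl
  | cons t l ih => simpa [evalStep] using ih

lemma foldl_parseStep_none (l : List String) : l.foldl parseStep none = none := by
  induction l with
  | nil => rfl
  | cons t l ih => simpa [parseStep] using ih

lemma foldl_depthStep_none (l : List String) : l.foldl depthStep none = none := by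
  induction l with
  | nil => rfl
  | cons t l ih => simpa [depthStep] using ih

-- the parse stack's length is exactly the depth count
lemma parse_depth (l : List String) : ∀ (st : List BExpr),
    (l.foldl parseStep (some st)).map List.length = l.foldl depthStep (some st.length) := by
  induction l with
  | nil => intro st; rfl
  | cons t l ih =>
    intro st
    have hbang : PySem.Chars.strIsalpha ['!'] = false := by decide
    have hamp : PySem.Chars.strIsalpha ['&'] = false := by decide
    have hbar : PySem.Chars.strIsalpha ['|'] = false := by decide
    have hdash : PySem.Chars.strIsalpha ['-'] = false := by decide
    have htil : PySem.Chars.strIsalpha ['~'] = false := by decide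
    by_cases hα : PySem.Chars.strIsalpha t.toList
    · simpa [List.foldl_cons, parseStep, depthStep, hα] using ih (BExpr.var t :: st)
    · by_cases hn : t = "!"
      · subst hn
        cases st with
        | nil => simp [List.foldl_cons, parseStep, depthStep, hbang,
            foldl_parseStep_none, foldl_depthStep_none]
        | cons x xs =>
          simpa [List.foldl_cons, parseStep, depthStep, hbang] using ih (BExpr.neg x :: xs)
      · by_cases hb : t = "&" ∨ t = "|" ∨ t = "-" ∨ t = "~"
        · have hbt : (t = "&" ∨ t = "|" ∨ t = "-" ∨ t = "~") = True := by simp [hb]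
          match st with
          | [] => simp [List.foldl_cons, parseStep, depthStep, hα, hn, hbt,
              foldl_parseStep_none, foldl_depthStep_none]
          | [x] => simp [List.foldl_cons, parseStep, depthStep, hα, hn, hbt,
              foldl_parseStep_none, foldl_depthStep_none]
          | b :: a :: xs =>
            simpa [List.foldl_cons, parseStep, depthStep, hα, hn, hbt] using
              ih (BExpr.node t a b :: xs)
        · push_neg at hb
          obtain ⟨h1, h2, h3, h4⟩ := hb
          simpa [List.foldl_cons, parseStep, depthStep, hα, hn, h1, h2, h3, h4] using ih st

-- simulation: A's boolean stack is the image under evalTree of B's tree stack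
lemma eval_parse_sim (v : PySem.Dict String Bool) (l : List String)
    (h : ∀ t ∈ l, v.contains t = PySem.Str.strIsalpha t) : ∀ (ts : List BExpr),
    l.foldl (evalStep v) (some (ts.map (evalTree v)))
      = (l.foldl parseStep (some ts)).map (List.map (evalTree v)) := by
  induction l with
  | nil => intro ts; rfl
  | cons t l ih =>
    intro ts
    have hbang : PySem.Chars.strIsalpha ['!'] = false := by decide
    have hamp : PySem.Chars.strIsalpha ['&'] = false := by decide
    have hbar : PySem.Chars.strIsalpha ['|'] = false := by decide
    have hdash : PySem.Chars.strIsalpha ['-'] = false := by decide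
    have htil : PySem.Chars.strIsalpha ['~'] = false := by decide
    have ht : v.contains t = PySem.Chars.strIsalpha t.toList := by
      rw [h t (by simp)]; simp
    have h' : ∀ t ∈ l, v.contains t = PySem.Str.strIsalpha t := fun t htl => h t (by simp [htl])
    by_cases hα : PySem.Chars.strIsalpha t.toList
    · have : l.foldl (evalStep v) (some ((BExpr.var t :: ts).map (evalTree v)))
          = (l.foldl parseStep (some (BExpr.var t :: ts))).map (List.map (evalTree v)) :=
        ih h' (BExpr.var t :: ts)
      simpa [List.foldl_cons, evalStep, parseStep, ht, hα, evalTree] using this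
    · have hc : v.contains t = false := by rw [ht]; simpa using hα
      by_cases hn : t = "!"
      · subst hn
        cases ts with
        | nil => simp [List.foldl_cons, evalStep, parseStep, hc, hbang,
            foldl_evalStep_none, foldl_parseStep_none]
        | cons x xs =>
          simpa [List.foldl_cons, evalStep, parseStep, hc, hbang, evalTree] using
            ih h' (BExpr.neg x :: xs)
      · by_cases hb : t = "&" ∨ t = "|" ∨ t = "-" ∨ t = "~"
        · rcases hb with hb | hb | hb | hb <;> subst hb
          · match ts with
            | [] => simp [List.foldl_cons, evalStep, parseStep, hc, hamp,
                foldl_evalStep_none, foldl_parseStep_none]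
            | [x] => simp [List.foldl_cons, evalStep, parseStep, hc, hamp,
                foldl_evalStep_none, foldl_parseStep_none]
            | b :: a :: xs =>
              simpa [List.foldl_cons, evalStep, parseStep, hc, hamp, hbar, hdash, htil,
                  evalTree] using ih h' (BExpr.node "&" a b :: xs)
          · match ts with
            | [] => simp [List.foldl_cons, evalStep, parseStep, hc, hbar,
                foldl_evalStep_none, foldl_parseStep_none]
            | [x] => simp [List.foldl_cons, evalStep, parseStep, hc, hbar,
                foldl_evalStep_none, foldl_parseStep_none]
            | b :: a :: xs =>
              simpa [List.foldl_cons, evalStep, parseStep, hc, hamp, hbar, hdash, htil,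
                  evalTree] using ih h' (BExpr.node "|" a b :: xs)
          · match ts with
            | [] => simp [List.foldl_cons, evalStep, parseStep, hc, hdash,
                foldl_evalStep_none, foldl_parseStep_none]
            | [x] => simp [List.foldl_cons, evalStep, parseStep, hc, hdash,
                foldl_evalStep_none, foldl_parseStep_none]
            | b :: a :: xs =>
              simpa [List.foldl_cons, evalStep, parseStep, hc, hamp, hbar, hdash, htil,
                  evalTree] using ih h' (BExpr.node "-" a b :: xs)
          · match ts with
            | [] => simp [List.foldl_cons, evalStep, parseStep, hc, htil,
                foldl_evalStep_none, foldl_parseStep_none]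
            | [x] => simp [List.foldl_cons, evalStep, parseStep, hc, htil,
                foldl_evalStep_none, foldl_parseStep_none]
            | b :: a :: xs =>
              simpa [List.foldl_cons, evalStep, parseStep, hc, hamp, hbar, hdash, htil,
                  evalTree] using ih h' (BExpr.node "~" a b :: xs)
        · push_neg at hb
          obtain ⟨h1, h2, h3, h4⟩ := hb
          simpa [List.foldl_cons, evalStep, parseStep, hc, hα, hn, h1, h2, h3, h4] using ih h' ts

-- membership in a dict built by the comprehension
lemma contains_update (ps : List (String × Bool)) : ∀ (d : PySem.Dict String Bool) (t : String),
    (d.update ps).contains t = (d.contains t || ps.any (fun p => t == p.1)) := by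
  induction ps with
  | nil => intro d t; simp [PySem.Dict.update]
  | cons p ps ih =>
    intro d t
    have hstep := ih (d.insert p.1 p.2) t
    simp only [PySem.Dict.update, List.foldl_cons] at hstep ⊢
    rw [hstep, PySem.Dict.contains_insert, List.any_cons]
    cases t == p.1 <;> cases d.contains t <;> simp

lemma mem_varsOf (expression : List String) (t : String) :
    t ∈ varsOf expression ↔ (PySem.Str.strIsalpha t ∧ t ∈ expression) := by
  unfold varsOf
  rw [PySem.List.mem_sorted, PySem.Set.mem_ofList, List.mem_filter]
  tauto

lemma length_mem_pyProductBools (n : Nat) : ∀ c ∈ pyProductBools n, c.length = n := by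
  induction n with
  | zero => intro c hc; simp [pyProductBools] at hc; simp [hc]
  | succ n ih =>
    intro c hc
    simp only [pyProductBools, List.mem_append, List.mem_map] at hc
    rcases hc with ⟨d, hd, rfl⟩ | ⟨d, hd, rfl⟩ <;> simp [ih d hd]

lemma contains_zip_dict (expression : List String) (c : List Bool)
    (hlen : c.length = (varsOf expression).length) (t : String) (hte : t ∈ expression) :
    (PySem.Dict.ofList ((varsOf expression).zip c)).contains t = PySem.Str.strIsalpha t := by
  rw [PySem.Dict.ofList, contains_update]
  have hfst : ((varsOf expression).zip c).map Prod.fst = varsOf expression :=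
    List.map_fst_zip (by omega)
  have hany : (((varsOf expression).zip c)).any (fun p => t == p.1)
      = (varsOf expression).any (fun k => t == k) := by
    conv_rhs => rw [← hfst]
    rw [List.any_map]
    rfl
  rw [hany]
  simp only [PySem.Dict.contains_empty, Bool.false_or]
  by_cases hα : PySem.Str.strIsalpha t
  · have hm : t ∈ varsOf expression := (mem_varsOf expression t).2 ⟨hα, hte⟩
    have hh : (varsOf expression).any (fun k => t == k) = true := by
      rw [List.any_eq_true]; exact ⟨t, hm, by simp⟩
    rw [hh]; exact hα.symm
  · have hm : t ∉ varsOf expression := fun hmm => hα ((mem_varsOf expression t).1 hmm).1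
    have hh : (varsOf expression).any (fun k => t == k) = false := by
      cases hA : (varsOf expression).any (fun k => t == k)
      · rfl
      · exfalso
        rw [List.any_eq_true] at hA
        obtain ⟨x, hx, he⟩ := hA
        have hxx : t = x := by simpa using he
        exact hm (hxx ▸ hx)
    rw [hh]
    have hf : PySem.Str.strIsalpha t = false := by simpa using hα
    exact hf.symm

-- ''.join over a cons
lemma join_empty_cons (s : String) (xs : List String) :
    PySem.Str.join "" (s :: xs) = s ++ PySem.Str.join "" xs := by
  simp only [PySem.Str.join, List.map_cons]
  have : PySem.Chars.join ("".toList) (s.toList :: xs.map String.toList)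
      = s.toList ++ PySem.Chars.join ("".toList) (xs.map String.toList) := by
    cases xs <;> simp [PySem.Chars.join, List.intercalate]
  rw [this]
  simp

-- A's accumulating loop, in closed form
lemma foldl_shape (g : List Bool → Bool) (l : List (List Bool)) :
    ∀ (a1 : List (List Bool)) (a2 : String),
    l.foldl (fun acc c => (acc.1 ++ [c ++ [g c]], acc.2 ++ (if g c then "1" else "0"))) (a1, a2)
      = (a1 ++ l.map (fun c => c ++ [g c]),
         a2 ++ PySem.Str.join "" (l.map (fun c => if g c then "1" else "0"))) := by
  induction l with
  | nil => intro a1 a2; simp [PySem.Str.join, PySem.Chars.join, List.intercalate]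
  | cons c l ih =>
    intro a1 a2
    rw [List.foldl_cons, ih, List.map_cons, List.map_cons, join_empty_cons]
    simp [String.append_assoc]

lemma toStr_bit (r : Bool) :
    PySem.Int.toStr (if r then 1 else 0) = (if r then "1" else "0") := by
  cases r <;> decide

-- Pre_ gives a successful parse with a nonempty stack
lemma pre_parse (expression : List String) (hpre : Pre_create_truth_table expression) :
    ∃ st : List BExpr, expression.foldl parseStep (some []) = some st ∧
      ∃ tr, st.getLast? = some tr := by
  have hd := parse_depth expression []
  unfold Pre_create_truth_table at hpre
  cases hst : expression.foldl parseStep (some []) with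
  | none =>
    rw [hst] at hd
    simp at hd
    rw [← hd] at hpre
    simp at hpre
  | some st =>
    rw [hst] at hd
    simp at hd
    rw [← hd] at hpre
    simp at hpre
    refine ⟨st, rfl, ?_⟩
    cases st with
    | nil => simp at hpre
    | cons x xs =>
      cases hgl : (x :: xs).getLast? with
      | none => simp at hgl
      | some tr => exact ⟨tr, rfl⟩

-- ===== VERDICT (by name: the statement is the Claim_ definition above) =====
theorem create_truth_table_spec : Claim_equal_create_truth_table := by
  intro expression _hdom hpre
  unfold Spec_create_truth_table
  obtain ⟨st, hst, tr, htr⟩ := pre_parse expression hpre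
  have hparse : parseTree expression = some tr := by
    unfold parseTree; rw [hst]; simpa using htr
  unfold create_truth_table create_truth_table_alt
  simp only [hparse, Option.getD_some]
  set vars := varsOf expression with hvars
  set combos := pyProductBools vars.length with hcombos
  -- per-combination agreement of the two result computations
  have hres : ∀ c ∈ combos,
      (evaluate_expression expression (PySem.Dict.ofList (vars.zip c))).getD false
        = evalTree (PySem.Dict.ofList (vars.zip c)) tr := by
    intro c hc
    have hlen : c.length = vars.length := length_mem_pyProductBools _ c hc
    set d := PySem.Dict.ofList (vars.zip c) with hd
    have hcont : ∀ t ∈ expression, d.contains t = PySem.Str.strIsalpha t := fun t ht =>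
      contains_zip_dict expression c (by rw [hlen]) t ht
    have hsim := eval_parse_sim d expression hcont []
    unfold evaluate_expression
    rw [show ((([] : List BExpr)).map (evalTree d)) = [] from rfl] at hsim
    rw [hsim, hst]
    simp [List.getLast?_map, htr]
  -- rewrite A's fold step with the tree evaluation, then close the fold
  have hcongr := PySem.List.foldl_congr_mem combos
    (fun (acc : List (List Bool) × String) c =>
      (acc.1 ++ [c ++ [(evaluate_expression expression (PySem.Dict.ofList (vars.zip c))).getD false]],
       acc.2 ++ PySem.Int.toStr (if (evaluate_expression expression (PySem.Dict.ofList (vars.zip c))).getD false then 1 else 0)))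
    (fun (acc : List (List Bool) × String) c =>
      (acc.1 ++ [c ++ [evalTree (PySem.Dict.ofList (vars.zip c)) tr]],
       acc.2 ++ (if evalTree (PySem.Dict.ofList (vars.zip c)) tr then "1" else "0")))
    ([], "")
    (by intro acc c hc; simp only [hres c hc, toStr_bit])
  rw [hcongr, foldl_shape (fun c => evalTree (PySem.Dict.ofList (vars.zip c)) tr) combos [] ""]
  simp [List.map_map, Function.comp_def]
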